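-- pv_equiv track=rewrite | github.com/zhangying9128/RRM | PERSONACHAT/evaluate_f1_repeat.py | eval_pair_repeat
-- ===== SOURCE A (Python) =====
-- from collections import Counter, defaultdict
--
-- def eval_pair_repeat(output):
--     output = Counter(output)
--     Repeat = 0
--     for token, count in output.items():
--         if 'rrmeos' in token:
--             continue
--         if count > 1:
--             Repeat += max(0, count-1)
--     return Repeat
-- ===== SOURCE B (Python) =====
-- def eval_pair_repeat(output):
--     seen = set()
--     Repeat = 0
--     for token in output:
--         if 'rrmeos' in token:
--             continue
--         if token in seen:
--             Repeat += 1
--         else: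
--             seen.add(token)
--     return Repeat
-- ===== Notes on version B (the rewrite author's own statement) =====
-- stated objective: alternative
-- what changed: Replaces A's build-a-Counter-then-sum-(count-1)-over-its-items with a single streaming pass keeping a seen-set and incrementing an accumulator on every repeated non-rrmeos token; no frequency table is materialised.
import Mathlib
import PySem

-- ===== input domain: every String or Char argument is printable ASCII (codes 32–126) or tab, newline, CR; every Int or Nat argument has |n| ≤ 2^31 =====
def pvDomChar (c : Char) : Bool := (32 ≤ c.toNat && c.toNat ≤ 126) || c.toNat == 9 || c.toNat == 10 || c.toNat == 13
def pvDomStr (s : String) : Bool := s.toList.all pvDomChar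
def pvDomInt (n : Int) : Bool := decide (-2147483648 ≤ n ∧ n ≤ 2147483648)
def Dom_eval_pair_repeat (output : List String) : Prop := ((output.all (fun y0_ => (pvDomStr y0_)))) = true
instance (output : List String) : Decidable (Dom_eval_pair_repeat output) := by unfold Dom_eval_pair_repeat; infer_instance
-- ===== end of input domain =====

-- B replaces A's Counter-table-then-sum with a single streaming pass over the tokens
-- maintaining a seen-set and an accumulator (objective: alternative decomposition, same cost).

-- ===== PORT A =====
def eval_pair_repeat (output : List String) : Int :=
  (PySem.Dict.counter output).items.foldl (fun R p =>
    if PySem.Str.isIn "rrmeos" p.1 then R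
    else if p.2 > 1 then R + max 0 (p.2 - 1) else R) 0

-- ===== PORT B =====
def eval_pair_repeat_alt (output : List String) : Int :=
  (output.foldl (fun (st : PySem.Set String × Int) token =>
      if PySem.Str.isIn "rrmeos" token then st
      else if PySem.Set.contains st.1 token then (st.1, st.2 + 1)
      else (PySem.Set.add st.1 token, st.2)) (PySem.Set.empty, 0)).2

-- ===== PRECONDITION & SPEC =====
def Spec_eval_pair_repeat (output : List String) (out : Int) : Prop := out = eval_pair_repeat_alt output
instance (output : List String) (out : Int) : Decidable (Spec_eval_pair_repeat output out) := by unfold Spec_eval_pair_repeat; infer_instance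

-- ===== CLAIM (what is proved, stated in full; the proofs are below) =====
def Claim_equal_eval_pair_repeat : Prop := ∀ (output : List String), Dom_eval_pair_repeat output → Spec_eval_pair_repeat output (eval_pair_repeat output)

-- ===== LEMMAS AND PROOFS =====

-- the per-distinct-token contribution of A's sum
def pvTerm (k : String) (c : Int) : Int :=
  if PySem.Str.isIn "rrmeos" k then 0 else if c > 1 then max 0 (c - 1) else 0

def pvSum (xs : List String) : Int :=
  ((PySem.Set.ofList xs).map (fun k => pvTerm k ((xs.count k : Int)))).sum

lemma eval_pair_repeat_eq_pvSum (xs : List String) :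
    eval_pair_repeat xs = pvSum xs := by
  unfold eval_pair_repeat pvSum
  rw [PySem.Dict.items_counter, List.foldl_map,
    PySem.List.foldl_congr_mem' _ _
      (fun (R : Int) (k : String) => R + pvTerm k ((xs.count k : Int))) _
      (by intro k _ R; simp only [pvTerm]; split_ifs <;> omega),
    PySem.List.foldl_add]
  simp

lemma sum_update {x : String} (f g : String → Int) :
    ∀ (l : List String), l.Nodup → x ∈ l → (∀ k ∈ l, k ≠ x → f k = g k) →
      (l.map f).sum = (l.map g).sum + (f x - g x) := by
  intro l
  induction l with
  | nil => intro _ hx; exact absurd hx (List.not_mem_nil)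
  | cons a l ih =>
    intro hnd hx h
    rcases List.mem_cons.mp hx with rfl | hxl
    · have hxnl : x ∉ l := (List.nodup_cons.mp hnd).1
      have hfg : l.map f = l.map g := by
        apply List.map_congr_left
        intro k hk
        exact h k (List.mem_cons_of_mem _ hk) (fun he => hxnl (he ▸ hk))
      simp [hfg]; ring
    · have hax : a ≠ x := fun he => (List.nodup_cons.mp hnd).1 (he ▸ hxl)
      have hrec := ih (List.nodup_cons.mp hnd).2 hxl
        (fun k hk => h k (List.mem_cons_of_mem _ hk))
      simp only [List.map_cons, List.sum_cons, hrec, h a (List.mem_cons_self) hax]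
      ring

lemma pvTerm_succ (x : String) (c : Int) (h : 1 ≤ c) :
    pvTerm x (c + 1) = pvTerm x c + (if PySem.Str.isIn "rrmeos" x then 0 else 1) := by
  unfold pvTerm
  by_cases hr : PySem.Str.isIn "rrmeos" x = true
  · rw [if_pos hr, if_pos hr, if_pos hr]; ring
  · rw [if_neg hr, if_neg hr, if_neg hr]
    rcases lt_or_ge 1 c with h1 | h1
    · rw [if_pos (by omega), if_pos h1, max_eq_right (by omega), max_eq_right (by omega)]
      ring
    · have hc : c = 1 := le_antisymm h1 h
      subst hc; norm_num

lemma pvSum_append (xs : List String) (x : String) :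
    pvSum (xs ++ [x]) =
      pvSum xs + (if PySem.Str.isIn "rrmeos" x then 0 else if x ∈ xs then 1 else 0) := by
  unfold pvSum
  rw [PySem.Set.ofList_append_singleton]
  by_cases hx : x ∈ xs
  · have hmem : x ∈ PySem.Set.ofList xs := (PySem.Set.mem_ofList xs x).mpr hx
    have hadd : PySem.Set.add (PySem.Set.ofList xs) x = PySem.Set.ofList xs := by
      unfold PySem.Set.add
      rw [if_pos ((PySem.Set.contains_iff _ x).mpr hmem)]
    rw [hadd]
    have hcnt : ∀ k : String, k ≠ x → ((xs ++ [x]).count k : Int) = (xs.count k : Int) := by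
      intro k hk
      simp [List.count_append, Ne.symm hk]
    have hcx : ((xs ++ [x]).count x : Int) = (xs.count x : Int) + 1 := by
      simp [List.count_append]
    rw [sum_update (fun k => pvTerm k (((xs ++ [x]).count k : Int)))
          (fun k => pvTerm k ((xs.count k : Int)))
          (PySem.Set.ofList xs) (PySem.Set.nodup_ofList xs) hmem
          (fun k _ hk => by simp only; rw [hcnt k hk])]
    have hpos : (1 : Int) ≤ (xs.count x : Int) := by
      have := List.count_pos_iff.mpr hx; omega
    simp only [hcx, pvTerm_succ x _ hpos, if_pos hx]
    ring
  · have hmem : x ∉ PySem.Set.ofList xs := fun h => hx ((PySem.Set.mem_ofList xs x).mp h)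
    have hadd : PySem.Set.add (PySem.Set.ofList xs) x = PySem.Set.ofList xs ++ [x] := by
      unfold PySem.Set.add
      rw [if_neg (by intro h; exact hmem ((PySem.Set.contains_iff _ x).mp h))]
    rw [hadd]
    have hcnt : ∀ k ∈ PySem.Set.ofList xs,
        (fun k => pvTerm k (((xs ++ [x]).count k : Int))) k
          = (fun k => pvTerm k ((xs.count k : Int))) k := by
      intro k hk
      have hkx : k ≠ x := fun he => hx (he ▸ (PySem.Set.mem_ofList xs k).mp hk)
      simp only
      simp [Ne.symm hkx, pvTerm]
    have hcx : ((xs ++ [x]).count x : Int) = 1 := by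
      have h0 : xs.count x = 0 := List.count_eq_zero.mpr hx
      simp [List.count_append, h0]
    rw [List.map_append, List.sum_append, List.map_congr_left hcnt]
    have hterm : pvTerm x ((((xs ++ [x]).count x : Nat)) : Int) = 0 := by
      rw [hcx]; unfold pvTerm
      split_ifs <;> omega
    simp only [List.map_cons, List.map_nil, List.sum_cons, List.sum_nil, hterm, if_neg hx]
    split_ifs <;> ring

-- B's loop invariant: after the prefix xs the state is (seen non-rrmeos tokens, pvSum xs)
lemma alt_fold_eq (xs : List String) :
    xs.foldl (fun (st : PySem.Set String × Int) token =>
      if PySem.Str.isIn "rrmeos" token then st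
      else if PySem.Set.contains st.1 token then (st.1, st.2 + 1)
      else (PySem.Set.add st.1 token, st.2)) (PySem.Set.empty, 0)
    = (PySem.Set.ofList (xs.filter (fun t => !PySem.Str.isIn "rrmeos" t)), pvSum xs) := by
  induction xs using List.reverseRecOn with
  | nil => rfl
  | append_singleton xs x ih =>
    rw [List.foldl_append, ih, List.foldl_cons, List.foldl_nil, pvSum_append,
        List.filter_append]
    by_cases hr : PySem.Str.isIn "rrmeos" x = true
    · rw [if_pos hr, if_pos hr]
      have hf : List.filter (fun t => !PySem.Str.isIn "rrmeos" t) [x] = [] := by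
        simp only [List.filter, hr]; rfl
      rw [hf, List.append_nil]
      simp
    · rw [if_neg hr, if_neg hr]
      have hf : List.filter (fun t => !PySem.Str.isIn "rrmeos" t) [x] = [x] := by
        simp only [List.filter]
        rw [Bool.not_eq_true] at hr
        rw [hr]; rfl
      rw [hf, PySem.Set.ofList_append_singleton]
      by_cases hx : x ∈ xs
      · have hmemf : x ∈ xs.filter (fun t => !PySem.Str.isIn "rrmeos" t) :=
          List.mem_filter.mpr ⟨hx, by rw [Bool.not_eq_true] at hr; rw [hr]; rfl⟩
        have hc : PySem.Set.contains
            (PySem.Set.ofList (xs.filter (fun t => !PySem.Str.isIn "rrmeos" t))) x = true :=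
          (PySem.Set.contains_iff _ x).mpr ((PySem.Set.mem_ofList _ x).mpr hmemf)
        rw [if_pos hc, if_pos hx]
        have hadd : PySem.Set.add
            (PySem.Set.ofList (xs.filter (fun t => !PySem.Str.isIn "rrmeos" t))) x
            = PySem.Set.ofList (xs.filter (fun t => !PySem.Str.isIn "rrmeos" t)) := by
          unfold PySem.Set.add
          rw [if_pos hc]
        rw [hadd]
      · have hc : PySem.Set.contains
            (PySem.Set.ofList (xs.filter (fun t => !PySem.Str.isIn "rrmeos" t))) x = false := by
          rw [Bool.eq_false_iff]
          intro h
          exact hx (List.mem_filter.mp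
            ((PySem.Set.mem_ofList _ x).mp ((PySem.Set.contains_iff _ x).mp h))).1
        rw [if_neg (by rw [hc]; exact Bool.false_ne_true), if_neg hx]
        have hadd : PySem.Set.add
            (PySem.Set.ofList (xs.filter (fun t => !PySem.Str.isIn "rrmeos" t))) x
            = PySem.Set.ofList (xs.filter (fun t => !PySem.Str.isIn "rrmeos" t)) ++ [x] := by
          unfold PySem.Set.add
          rw [if_neg (by rw [hc]; exact Bool.false_ne_true)]
        rw [hadd]
        simp

-- ===== VERDICT (by name: the statement is the Claim_ definition above) =====
theorem eval_pair_repeat_spec : Claim_equal_eval_pair_repeat := by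
  intro output _
  show eval_pair_repeat output = eval_pair_repeat_alt output
  rw [eval_pair_repeat_eq_pvSum]
  unfold eval_pair_repeat_alt
  rw [alt_fold_eq]
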